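-- pv_equiv track=rewrite | github.com/Albert-learner/Algorithm | Programmers/LEVEL3/Move110.py | solution_other
-- ===== SOURCE A (Python) =====
-- def solution_other(s):
--     answer = []
--
--     def extract(s):
--         count, stack = 0, []
--         for _s in s:
--             if _s == '0' and stack[-2:] == ['1', '1']:
--                 stack.pop()
--                 stack.pop()
--                 count += 1
--             else:
--                 stack.append(_s)
--
--         return ''.join(stack), count
--
--     def rearrange(s):
--         for i in range(-1, -len(s) - 1, -1):
--             pointer = len(s) + (i + 1)
--             if s[i] == '0':
--                 return s[:pointer] + '110' + s[pointer:]
--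
--         return '110' + s
--
--     for _s in s:
--         _s, count = extract(_s)
--         for _ in range(count):
--             _s = rearrange(_s)
--         answer.append(_s)
--     return answer
-- ===== SOURCE B (Python) =====
-- def solution_other(s):
--     answer = []
--     for t in s:
--         stack = []
--         count = 0
--         for c in t:
--             if c == '0' and len(stack) >= 2 and stack[-1] == '1' and stack[-2] == '1':
--                 stack.pop()
--                 stack.pop()
--                 count += 1
--             else:
--                 stack.append(c)
--         rest = ''.join(stack)
--         pos = rest.rfind('0') + 1
--         answer.append(rest[:pos] + '110' * count + rest[pos:])
--     return answer
-- ===== Notes on version B (the rewrite author's own statement) =====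
-- stated objective: alternative
-- what changed: Instead of calling rearrange (a full right-to-left scan plus splice) once per extracted '110', B inserts '110'*count in a single splice after the rightmost '0' found by one rfind; measured no faster on random inputs (few '110' patterns occur there).
import Mathlib
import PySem

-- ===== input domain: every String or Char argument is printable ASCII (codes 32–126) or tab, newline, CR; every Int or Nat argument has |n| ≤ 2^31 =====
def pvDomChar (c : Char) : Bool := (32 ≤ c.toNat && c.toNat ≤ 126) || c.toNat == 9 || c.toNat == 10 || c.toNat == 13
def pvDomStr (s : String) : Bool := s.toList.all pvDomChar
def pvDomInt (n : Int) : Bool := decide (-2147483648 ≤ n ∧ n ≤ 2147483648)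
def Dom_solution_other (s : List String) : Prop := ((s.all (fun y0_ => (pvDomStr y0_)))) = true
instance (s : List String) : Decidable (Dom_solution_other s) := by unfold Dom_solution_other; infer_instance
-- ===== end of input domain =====

-- B replaces A's count-times repeated rearrange scan by a single rfind + one splice of '110'*count (a different algorithm, same measured cost on random inputs).


-- ===== PORT A =====
-- Python's stack is kept REVERSED here (list head = stack top); stack[-2:] == ['1','1'] is `take 2 = ['1','1']` on the reversed stack.
def pvStepA (st : List Char × Nat) (c : Char) : List Char × Nat :=
  if c = '0' ∧ st.1.take 2 = ['1', '1'] then (st.1.drop 2, st.2 + 1)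
  else (c :: st.1, st.2)

def pvExtractA (l : List Char) : List Char × Nat :=
  let r := l.foldl pvStepA ([], 0)
  (r.1.reverse, r.2)

-- A's rearrange scans from the right; ported as a scan of the REVERSED string.
def pvRearrAux : List Char → List Char
  | [] => ['0', '1', '1']
  | c :: rest => if c = '0' then '0' :: '1' :: '1' :: '0' :: rest else c :: pvRearrAux rest

def pvRearrangeA (s : List Char) : List Char := (pvRearrAux s.reverse).reverse

-- the `for _ in range(count)` loop
def pvLoopA : Nat → List Char → List Char
  | 0, s => s
  | n + 1, s => pvLoopA n (pvRearrangeA s)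

def solution_other (s : List String) : List String :=
  s.map (fun t =>
    let e := pvExtractA t.toList
    String.ofList (pvLoopA e.2 e.1))

-- ===== PORT B =====
def pvExtractB : List Char → List Char → Nat → List Char × Nat
  | [], stk, cnt => (stk.reverse, cnt)
  | c :: t, stk, cnt =>
    if c = '0' ∧ 2 ≤ stk.length ∧ stk.headD ' ' = '1' ∧ (stk.drop 1).headD ' ' = '1' then
      pvExtractB t (stk.drop 2) (cnt + 1)
    else pvExtractB t (c :: stk) cnt

-- rest.rfind('0')+1 split, done on the reversed list; then one splice of '110'*count.
def solution_other_alt (s : List String) : List String :=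
  s.map (fun t =>
    let e := pvExtractB t.toList [] 0
    let r := e.1.reverse
    let suf := r.takeWhile (· ≠ '0')
    let pre := r.dropWhile (· ≠ '0')
    String.ofList (pre.reverse ++ (List.replicate e.2 ['1', '1', '0']).flatten ++ suf.reverse))

-- ===== PRECONDITION & SPEC =====
def Spec_solution_other (s : List String) (out : List String) : Prop := out = solution_other_alt s
instance (s : List String) (out : List String) : Decidable (Spec_solution_other s out) := by unfold Spec_solution_other; infer_instance

-- ===== CLAIM (what is proved, stated in full; the proofs are below) =====
def Claim_equal_solution_other : Prop := ∀ (s : List String), Dom_solution_other s → Spec_solution_other s (solution_other s)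

-- ===== LEMMAS AND PROOFS =====

-- the two step conditions coincide
theorem pvCond_iff (c : Char) (stk : List Char) :
    (c = '0' ∧ 2 ≤ stk.length ∧ stk.headD ' ' = '1' ∧ (stk.drop 1).headD ' ' = '1') ↔
      (c = '0' ∧ stk.take 2 = ['1', '1']) := by
  rcases stk with _ | ⟨x, _ | ⟨y, rest⟩⟩ <;> simp

-- the two extractions agree
theorem pvExtract_eq (l : List Char) : ∀ (stk : List Char) (cnt : Nat),
    pvExtractB l stk cnt = ((l.foldl pvStepA (stk, cnt)).1.reverse, (l.foldl pvStepA (stk, cnt)).2) := by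
  induction l with
  | nil => intro stk cnt; simp [pvExtractB]
  | cons c t ih =>
    intro stk cnt
    by_cases h : c = '0' ∧ stk.take 2 = ['1', '1']
    · rw [pvExtractB, if_pos ((pvCond_iff c stk).mpr h)]
      simp only [List.foldl_cons, pvStepA, if_pos h]
      exact ih _ _
    · rw [pvExtractB, if_neg (fun hh => h ((pvCond_iff c stk).mp hh))]
      simp only [List.foldl_cons, pvStepA, if_neg h]
      exact ih _ _

def pvLoopRev : Nat → List Char → List Char
  | 0, r => r
  | n + 1, r => pvLoopRev n (pvRearrAux r)

theorem pvLoopA_rev (n : Nat) : ∀ s : List Char, pvLoopA n s = (pvLoopRev n s.reverse).reverse := by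
  induction n with
  | zero => intro s; simp [pvLoopA, pvLoopRev]
  | succ n ih =>
    intro s
    rw [pvLoopA, pvLoopRev, ih, pvRearrangeA, List.reverse_reverse]

theorem pvRearrAux_append (a b : List Char) (ha : ∀ c ∈ a, c ≠ '0') :
    pvRearrAux (a ++ b) = a ++ pvRearrAux b := by
  induction a with
  | nil => simp
  | cons c a ih =>
    have hc : c ≠ '0' := ha c (by simp)
    simp only [List.cons_append, pvRearrAux, if_neg hc]
    rw [ih (fun x hx => ha x (by simp [hx]))]

theorem pvRep_comm (u : List Char) (n : Nat) :
    (List.replicate n u).flatten ++ u = u ++ (List.replicate n u).flatten := by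
  induction n with
  | zero => simp
  | succ n ih => simp only [List.replicate_succ, List.flatten_cons, List.append_assoc, ih]

theorem pvRep_reverse (n : Nat) :
    ((List.replicate n ['0', '1', '1']).flatten).reverse = (List.replicate n ['1', '1', '0']).flatten := by
  induction n with
  | zero => simp
  | succ n ih =>
    simp only [List.replicate_succ, List.flatten_cons, List.reverse_append, ih]
    rw [show (['0', '1', '1'] : List Char).reverse = ['1', '1', '0'] from rfl,
      pvRep_comm ['1', '1', '0'] n]

theorem pvLoopRev_spec (n : Nat) : ∀ a b : List Char, (∀ c ∈ a, c ≠ '0') →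
    (b = [] ∨ ∃ b0, b = '0' :: b0) →
    pvLoopRev n (a ++ b) = a ++ (List.replicate n ['0', '1', '1']).flatten ++ b := by
  induction n with
  | zero => intro a b _ _; simp [pvLoopRev]
  | succ n ih =>
    intro a b ha hb
    rw [pvLoopRev, pvRearrAux_append a b ha]
    rcases hb with rfl | ⟨b0, rfl⟩
    · rw [show pvRearrAux [] = ['0', '1', '1'] from rfl,
        ih a ['0', '1', '1'] ha (Or.inr ⟨['1', '1'], rfl⟩)]
      simp only [List.append_nil, List.replicate_succ, List.flatten_cons]
      rw [List.append_assoc, pvRep_comm]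
    · rw [show pvRearrAux ('0' :: b0) = '0' :: '1' :: '1' :: '0' :: b0 from rfl,
        ih a ('0' :: '1' :: '1' :: '0' :: b0) ha (Or.inr ⟨_, rfl⟩)]
      simp only [List.replicate_succ, List.flatten_cons, List.append_assoc]
      congr 1
      rw [show ('0' :: '1' :: '1' :: '0' :: b0 : List Char) = ['0', '1', '1'] ++ '0' :: b0 from rfl,
        ← List.append_assoc, pvRep_comm, List.append_assoc]

-- ===== VERDICT (by name: the statement is the Claim_ definition above) =====
theorem pvElem (l : List Char) :
    pvLoopA (pvExtractA l).2 (pvExtractA l).1 =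
      (let e := pvExtractB l [] 0
       let r := e.1.reverse
       let suf := r.takeWhile (· ≠ '0')
       let pre := r.dropWhile (· ≠ '0')
       pre.reverse ++ (List.replicate e.2 ['1', '1', '0']).flatten ++ suf.reverse) := by
  have he : pvExtractB l [] 0 = pvExtractA l := by
    simpa [pvExtractA] using pvExtract_eq l [] 0
  simp only [he]
  set e := pvExtractA l with hedef
  set r := e.1.reverse with hr
  have hsplit : r.takeWhile (· ≠ '0') ++ r.dropWhile (· ≠ '0') = r :=
    List.takeWhile_append_dropWhile
  have ha : ∀ c ∈ r.takeWhile (· ≠ '0'), c ≠ '0' := by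
    intro c hc
    simpa using List.mem_takeWhile_imp hc
  have hb : r.dropWhile (· ≠ '0') = [] ∨ ∃ b0, r.dropWhile (· ≠ '0') = '0' :: b0 := by
    rcases hd : r.dropWhile (· ≠ '0') with _ | ⟨x, xs⟩
    · exact Or.inl rfl
    · have hne : r.dropWhile (fun c => decide (c ≠ '0')) ≠ [] := by
        rw [hd]; exact List.cons_ne_nil _ _
      have h2 := List.head_dropWhile_not (fun c => decide (c ≠ '0')) hne
      have hx : (r.dropWhile (fun c => decide (c ≠ '0'))).head hne = x := by
        simp only [hd, List.head_cons]
      rw [hx] at h2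
      have hx0 : x = '0' := by simpa using h2
      exact Or.inr ⟨xs, by subst hx0; rfl⟩
  rw [pvLoopA_rev, ← hr, ← hsplit, pvLoopRev_spec e.2 _ _ ha hb]
  simp [List.reverse_append, pvRep_reverse, List.append_assoc]

-- ===== VERDICT (by name: the statement is the Claim_ definition above) =====
theorem solution_other_spec : Claim_equal_solution_other := by
  intro s _
  unfold Spec_solution_other solution_other solution_other_alt
  refine List.map_congr_left ?_
  intro t _
  exact congrArg String.ofList (pvElem t.toList)
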